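-- pv_equiv track=rewrite | github.com/devyoungk/Algorithm | Python3/프로그래머스/1/133499. 옹알이 （2）/옹알이 （2）.py | solution
-- ===== SOURCE A (Python) =====
-- def solution(babbling):
--     answer = 0
--     A = ["aya", "ye", "woo", "ma"]
--     B = True
--     for s in babbling:
--         x = ''
--         while len(s) > 1:
--             for a in A:
--                 if a == x:
--                     continue
--                 elif s.startswith(a):
--                     s = s.replace(a,'',1)
--                     x = a
--                     break
--             else:
--                 break
--         if s == '':
--             answer += 1
--     return answer
-- ===== SOURCE B (Python) =====
-- _FIRST = {'a': 'aya', 'y': 'ye', 'w': 'woo', 'm': 'ma'}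
--
--
-- def _pronounceable(s):
--     i, last, n = 0, '', len(s)
--     while i < n:
--         w = _FIRST.get(s[i])
--         if w is None or w == last or not s.startswith(w, i):
--             return False
--         i += len(w)
--         last = w
--     return True
--
--
-- def solution(babbling):
--     return sum(1 for s in babbling if _pronounceable(s))
-- ===== Notes on version B (the rewrite author's own statement) =====
-- stated objective: faster
-- what changed: Replaces A's repeated inner scan over the word list plus per-match string rebuild via s.replace (O(L) per matched word) with a single left-to-right cursor scan that dispatches on the current character through a first-letter dict (the four words have distinct first letters, so greedy first-char dispatch is exact).
import Mathlib
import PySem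

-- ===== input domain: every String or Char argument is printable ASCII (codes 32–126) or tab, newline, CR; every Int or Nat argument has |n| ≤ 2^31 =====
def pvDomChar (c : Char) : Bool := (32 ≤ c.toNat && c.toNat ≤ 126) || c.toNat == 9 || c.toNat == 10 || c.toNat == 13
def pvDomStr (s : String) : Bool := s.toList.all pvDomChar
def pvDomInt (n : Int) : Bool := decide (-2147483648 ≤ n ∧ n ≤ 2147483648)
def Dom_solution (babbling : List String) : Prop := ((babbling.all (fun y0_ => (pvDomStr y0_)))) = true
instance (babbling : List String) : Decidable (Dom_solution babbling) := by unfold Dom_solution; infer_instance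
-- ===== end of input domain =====

-- B replaces A's per-word inner scan with O(L) string rebuilds (s.replace) by a single cursor
-- scan dispatching on the first character (the four words have distinct first letters); objective: faster.

-- ===== PORT A =====
-- the word list A = ["aya", "ye", "woo", "ma"]
def pvWordsA : List (List Char) := [['a','y','a'], ['y','e'], ['w','o','o'], ['m','a']]

-- s.replace(a, '', 1): removes the FIRST occurrence of a; exact for nonempty a
-- (PySem.Chars.replace has no count argument, so this is a hand port)
def pvReplace1 : List Char → List Char → List Char
  | [], _ => []
  | c :: rest, old =>
      if PySem.Chars.startswith (c :: rest) old then (c :: rest).drop old.length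
      else c :: pvReplace1 rest old

-- the inner 'for a in A: … break / else: break': some (new s, new x) on break, none on fall-through
def pvTryA : List (List Char) → List Char → List Char → Option (List Char × List Char)
  | [], _, _ => none
  | a :: rest, s, x =>
      if a = x then pvTryA rest s x
      else if PySem.Chars.startswith s a then some (pvReplace1 s a, a)
      else pvTryA rest s x

-- the 'while len(s) > 1' loop; fuel = initial len(s) suffices (every iteration shortens s by ≥ 2)
def pvWhileA : Nat → List Char → List Char → List Char
  | 0, s, _ => s
  | fuel + 1, s, x =>
      if 1 < s.length then
        match pvTryA pvWordsA s x with
        | some (s', x') => pvWhileA fuel s' x'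
        | none => s
      else s

def solution (babbling : List String) : Int :=
  babbling.foldl (fun answer s =>
    if pvWhileA s.toList.length s.toList [] = [] then answer + 1 else answer) 0

-- ===== PORT B =====
-- _FIRST = {'a': 'aya', 'y': 'ye', 'w': 'woo', 'm': 'ma'}
def pvFirst : PySem.Dict Char (List Char) :=
  PySem.Dict.ofList [('a', ['a','y','a']), ('y', ['y','e']), ('w', ['w','o','o']), ('m', ['m','a'])]

-- dict lookups in pvFirst return one of the four words, all of length ≥ 2 (needed for termination)
theorem pvFirst_get_len (c : Char) (w : List Char) (h : pvFirst.get? c = some w) : 2 ≤ w.length := by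
  have e : pvFirst = PySem.Dict.mk [('a', ['a','y','a']), ('y', ['y','e']), ('w', ['w','o','o']), ('m', ['m','a'])] := by rfl
  rw [e] at h
  simp only [PySem.Dict.get?_mk_cons] at h
  repeat' split at h
  all_goals try (injection h with h; subst h; decide)
  all_goals simp [PySem.Dict.get?] at h

-- the 'while i < n' cursor loop of _pronounceable; s.startswith(w, i) is ported as
-- PySem.Chars.startswith (s.drop i) w (exact: i is a Nat cursor with i ≤ len(s))
def pvLoopB (s : List Char) (i : Nat) (last : List Char) : Bool :=
  if h : i < s.length then
    match hw : pvFirst.get? s[i] with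
    | none => false
    | some w =>
        if w = last then false
        else if PySem.Chars.startswith (s.drop i) w then pvLoopB s (i + w.length) w
        else false
  else true
termination_by s.length - i
decreasing_by have := pvFirst_get_len _ _ hw; omega

def solution_alt (babbling : List String) : Int :=
  babbling.foldl (fun acc s => acc + if pvLoopB s.toList 0 [] then 1 else 0) 0

-- ===== PRECONDITION & SPEC =====
def Spec_solution (babbling : List String) (out : Int) : Prop := out = solution_alt babbling
instance (babbling : List String) (out : Int) : Decidable (Spec_solution babbling out) := by unfold Spec_solution; infer_instance

-- ===== CLAIM (what is proved, stated in full; the proofs are below) =====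
def Claim_equal_solution : Prop := ∀ (babbling : List String), Dom_solution babbling → Spec_solution babbling (solution babbling)

-- ===== LEMMAS AND PROOFS =====

-- the dict, evaluated
theorem pvFirst_get?_eq (c : Char) : pvFirst.get? c =
    if 'a' = c then some ['a','y','a'] else if 'y' = c then some ['y','e']
    else if 'w' = c then some ['w','o','o'] else if 'm' = c then some ['m','a'] else none := by
  have e : pvFirst = PySem.Dict.mk [('a', ['a','y','a']), ('y', ['y','e']), ('w', ['w','o','o']), ('m', ['m','a'])] := by rfl
  rw [e]
  by_cases h1 : 'a' = c
  · subst h1; decide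
  by_cases h2 : 'y' = c
  · subst h2; decide
  by_cases h3 : 'w' = c
  · subst h3; decide
  by_cases h4 : 'm' = c
  · subst h4; decide
  · simp [PySem.Dict.get?, List.find?, beq_eq_false_iff_ne.mpr h1, beq_eq_false_iff_ne.mpr h2,
      beq_eq_false_iff_ne.mpr h3, beq_eq_false_iff_ne.mpr h4, h1, h2, h3, h4]

-- a word whose first character differs cannot be a startswith-prefix
theorem pvSW_ne (c d : Char) (rest wt : List Char) (h : d ≠ c) :
    PySem.Chars.startswith (c :: rest) (d :: wt) = false := by
  rw [Bool.eq_false_iff]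
  intro hx
  rw [PySem.Chars.startswith_iff] at hx
  exact h (List.cons_prefix_cons.mp hx).1

theorem pvReplace1_eq (c : Char) (rest old : List Char)
    (h : PySem.Chars.startswith (c :: rest) old = true) :
    pvReplace1 (c :: rest) old = (c :: rest).drop old.length := by
  simp [pvReplace1, h]

-- the for-else over A's word list, characterised by the first character of s
theorem pvTryA_char (c : Char) (rest x : List Char) :
    pvTryA pvWordsA (c :: rest) x =
      match pvFirst.get? c with
      | none => none
      | some w =>
          if w = x then none
          else if PySem.Chars.startswith (c :: rest) w then some (pvReplace1 (c :: rest) w, w)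
          else none := by
  rw [pvFirst_get?_eq]
  by_cases ha : c = 'a'
  · subst ha
    simp [pvTryA, pvWordsA, pvSW_ne _ _ _ _ (by decide : ('y':Char) ≠ 'a'),
      pvSW_ne _ _ _ _ (by decide : ('w':Char) ≠ 'a'), pvSW_ne _ _ _ _ (by decide : ('m':Char) ≠ 'a')]
  by_cases hy : c = 'y'
  · subst hy
    simp [pvTryA, pvWordsA, pvSW_ne _ _ _ _ (by decide : ('a':Char) ≠ 'y'),
      pvSW_ne _ _ _ _ (by decide : ('w':Char) ≠ 'y'), pvSW_ne _ _ _ _ (by decide : ('m':Char) ≠ 'y')]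
  by_cases hw : c = 'w'
  · subst hw
    simp [pvTryA, pvWordsA, pvSW_ne _ _ _ _ (by decide : ('a':Char) ≠ 'w'),
      pvSW_ne _ _ _ _ (by decide : ('y':Char) ≠ 'w'), pvSW_ne _ _ _ _ (by decide : ('m':Char) ≠ 'w')]
  by_cases hm : c = 'm'
  · subst hm
    simp [pvTryA, pvWordsA, pvSW_ne _ _ _ _ (by decide : ('a':Char) ≠ 'm'),
      pvSW_ne _ _ _ _ (by decide : ('y':Char) ≠ 'm'), pvSW_ne _ _ _ _ (by decide : ('w':Char) ≠ 'm')]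
  · simp [pvTryA, pvWordsA, pvSW_ne _ _ _ _ (Ne.symm ha), pvSW_ne _ _ _ _ (Ne.symm hy),
      pvSW_ne _ _ _ _ (Ne.symm hw), pvSW_ne _ _ _ _ (Ne.symm hm),
      Ne.symm ha, Ne.symm hy, Ne.symm hw, Ne.symm hm]

-- the core: A's while loop empties s.drop i iff B's cursor loop accepts from i
theorem pvMain (fuel : Nat) : ∀ (s : List Char) (i : Nat) (x : List Char),
    i ≤ s.length → s.length - i ≤ fuel →
    ((pvWhileA fuel (s.drop i) x = []) ↔ (pvLoopB s i x = true)) := by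
  induction fuel with
  | zero =>
    intro s i x hi hf
    have hlen : i = s.length := by omega
    rw [pvLoopB]
    simp [pvWhileA, hlen]
  | succ fuel ih =>
    intro s i x hi hf
    by_cases h : i < s.length
    · have ht : s[i] :: s.drop (i + 1) = s.drop i := List.getElem_cons_drop h
      rw [pvLoopB]
      rw [dif_pos h]
      rw [← ht]
      simp only [pvWhileA]
      rw [pvTryA_char]
      cases hw : pvFirst.get? s[i] with
      | none => simp [List.length_drop, h]
      | some w =>
        have hwlen : 2 ≤ w.length := pvFirst_get_len _ _ hw
        by_cases hx : w = x
        · simp [hx, List.length_drop, h]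
        · simp only [hx, if_false]
          by_cases hs : PySem.Chars.startswith (s[i] :: s.drop (i + 1)) w = true
          · have hpre : w <+: s.drop i := by
              rw [← ht]; exact (PySem.Chars.startswith_iff _ _).mp hs
            have hwle : w.length ≤ s.length - i := by
              have := hpre.length_le; simp at this; omega
            have h1 : 1 < (s[i] :: s.drop (i + 1)).length := by
              simp [List.length_drop]; omega
            rw [if_pos h1, hs, pvReplace1_eq _ _ _ hs]
            have hdd : (s[i] :: s.drop (i + 1)).drop w.length = s.drop (i + w.length) := by
              rw [ht, List.drop_drop]; try rw [Nat.add_comm w.length i]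
            simp only [hdd]
            exact ih s (i + w.length) w (by omega) (by omega)
          · rw [Bool.not_eq_true] at hs
            rw [hs]
            simp [List.length_drop, h]
    · have hlen : i = s.length := by omega
      rw [pvLoopB]
      simp [pvWhileA, hlen]

-- per string: the two acceptance tests agree
theorem pvString (s : List Char) :
    (pvWhileA s.length s [] = []) ↔ (pvLoopB s 0 [] = true) := by
  have := pvMain s.length s 0 [] (by omega) (by omega)
  simpa using this

-- ===== VERDICT (by name: the statement is the Claim_ definition above) =====
theorem solution_spec : Claim_equal_solution := by
  intro babbling _
  unfold Spec_solution solution solution_alt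
  apply PySem.List.foldl_congr_mem
  intro acc s _
  by_cases hc : pvLoopB s.toList 0 [] = true
  · rw [if_pos ((pvString s.toList).mpr hc), hc]
    simp
  · rw [Bool.not_eq_true] at hc
    rw [if_neg (fun hh => by rw [(pvString s.toList).mp hh] at hc; cases hc), hc]
    simp
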